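-- pv_equiv track=rewrite | github.com/chaosxlive/ProblemSolving | Leetcode/0001-1000/0401-0500/0411. Minimum Unique Word Abbreviation.py | minAbbreviation
-- ===== SOURCE A (Python) =====
-- from typing import List
--
-- def minAbbreviation(target: str, dictionary: List[str]) -> str:
--     TL = len(target)
--     dictionary = list(filter(lambda x: len(x) == TL, dictionary))
--
--     def getAbbrs(word: str) -> List[str | int]:
--         L = len(word)
--         abbrs = []
--         for i in range(2**L):
--             abbr = []
--             prev = 0
--             for j in range(L):
--                 m = 1 << j
--                 if i & m:
--                     if j != prev:
--                         abbr.append(j - prev)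
--                     prev = j + 1
--                     abbr.append(word[j])
--             if prev != L:
--                 abbr.append(L - prev)
--             abbrs.append(abbr)
--         return abbrs
--
--     tgtAbbrs = sorted(getAbbrs(target), key=lambda x: len(x))
--
--     def isMatched(abbr: List[str | int], word: str) -> bool:
--         i = j = 0
--         while i < len(abbr) and j < len(word):
--             if isinstance(abbr[i], int):
--                 j += abbr[i]
--             else:
--                 if abbr[i] != word[j]:
--                     return False
--                 j += 1
--             i += 1
--         return i == len(abbr) and j == len(word)
--
--     for abbr in tgtAbbrs:
--         isValid = True
--         for word in dictionary:
--             if isMatched(abbr, word):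
--                 isValid = False
--                 break
--         if isValid:
--             return ''.join(map(lambda x: str(x) if isinstance(x, int) else x, abbr))
--     return target
-- ===== SOURCE B (Python) =====
-- from typing import List
--
-- def minAbbreviation(target: str, dictionary: List[str]) -> str:
--     L = len(target)
--     # one pass over the dictionary: per same-length word, a bitmask of positions
--     # where it differs from target; an abbreviation (kept-positions mask) matches
--     # the word iff mask & diff == 0
--     diffs = []
--     for w in dictionary:
--         if len(w) == L:
--             m = 0
--             for j in range(L):
--                 if w[j] != target[j]:
--                     m |= 1 << j
--             diffs.append(m)
--     # single pass over all masks, tracking the (token_count, mask) lexicographic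
--     # minimum among valid masks (no sort, no abbreviation strings built)
--     best = None
--     for mask in range(1 << L):
--         if all(mask & d for d in diffs):
--             t = 0
--             prev_kept = True
--             for j in range(L):
--                 kept = mask >> j & 1
--                 if kept:
--                     t += 1
--                 elif prev_kept:
--                     t += 1
--                 prev_kept = kept
--             key = (t, mask)
--             if best is None or key < best:
--                 best = key
--     if best is None:
--         return target
--     mask = best[1]
--     out = []
--     run = 0
--     for j in range(L):
--         if mask >> j & 1:
--             if run:
--                 out.append(str(run))
--                 run = 0
--             out.append(target[j])
--         else:
--             run += 1
--     if run:
--         out.append(str(run))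
--     return ''.join(out)
-- ===== Notes on version B (the rewrite author's own statement) =====
-- stated objective: alternative
-- what changed: Replaces building, sorting and string-matching all 2^L abbreviation token lists with per-word difference bitmasks (validity = one AND per word) and a single sort-free pass over masks tracking the lexicographic (token-count, mask) minimum; only the winning mask is rendered to a string (intended as faster per mask: O(n) vs O(n*L) matching plus no sort, but both remain 2^L-dominated, measured 1.25x at the largest size both finish).
import Mathlib
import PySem

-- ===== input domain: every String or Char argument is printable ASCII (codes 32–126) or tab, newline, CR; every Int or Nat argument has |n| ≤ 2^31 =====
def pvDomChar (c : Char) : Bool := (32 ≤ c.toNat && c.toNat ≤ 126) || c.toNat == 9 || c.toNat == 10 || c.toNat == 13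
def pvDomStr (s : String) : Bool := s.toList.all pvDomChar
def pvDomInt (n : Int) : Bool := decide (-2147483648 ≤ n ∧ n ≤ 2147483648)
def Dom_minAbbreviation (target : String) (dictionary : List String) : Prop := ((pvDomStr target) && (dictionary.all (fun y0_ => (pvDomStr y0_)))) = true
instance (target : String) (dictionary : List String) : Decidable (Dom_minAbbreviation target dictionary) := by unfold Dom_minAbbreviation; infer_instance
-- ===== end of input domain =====

-- B replaces A's build-sort-and-string-match over all 2^L abbreviations by per-word
-- difference bitmasks and a single sort-free minimum-tracking pass over masks.

-- ===== PORT A =====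

-- an abbreviation token: a run count (int) or a kept letter (1-char string)
inductive PvTok
  | num : Int → PvTok
  | ch : Char → PvTok
deriving DecidableEq, Repr

-- body of getAbbrs' inner `for j in range(L)` loop; state = (abbr, prev)
def pvAbbrStep (i : Int) (w : List Char) (st : List PvTok × Int) (j : Int) : List PvTok × Int :=
  let m : Int := (1 : Int) <<< j.toNat   -- 1 << j  (j ≥ 0 on every call)
  if PySem.Int.band i m ≠ 0 then
    let abbr := if j ≠ st.2 then st.1 ++ [PvTok.num (j - st.2)] else st.1
    (abbr ++ [PvTok.ch (PySem.List.pyGetD w j ' ')], j + 1)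
  else st

-- the abbreviation of `w` for bit pattern i
def pvAbbrOf (w : List Char) (i : Int) : List PvTok :=
  let L : Int := w.length
  let st := (PySem.List.pyRange 0 L 1).foldl (pvAbbrStep i w) ([], 0)
  if st.2 ≠ L then st.1 ++ [PvTok.num (L - st.2)] else st.1

-- getAbbrs: `for i in range(2**L): abbrs.append(...)`
def pvGetAbbrs (w : List Char) : List (List PvTok) :=
  (PySem.List.pyRange 0 ((2 : Int) ^ w.length) 1).foldl (fun acc i => acc ++ [pvAbbrOf w i]) []

-- isMatched's while loop: abbr suffix still to scan, j the cursor into word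
def pvIsMatchedAux (w : List Char) : List PvTok → Int → Bool
  | [], j => j == (w.length : Int)                    -- i = len(abbr): return j == len(word)
  | t :: rest, j =>
    if j < (w.length : Int) then
      match t with
      | .num n => pvIsMatchedAux w rest (j + n)
      | .ch c => if c ≠ PySem.List.pyGetD w j ' ' then false else pvIsMatchedAux w rest (j + 1)
    else false                                         -- j = len(word) but i < len(abbr)

def pvIsMatched (abbr : List PvTok) (w : List Char) : Bool := pvIsMatchedAux w abbr 0

-- ''.join(map(lambda x: str(x) if isinstance(x, int) else x, abbr))
def pvJoinChars : List PvTok → List Char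
  | [] => []
  | .num n :: r => PySem.Int.toChars n ++ pvJoinChars r
  | .ch c :: r => c :: pvJoinChars r

-- sorted(tgtAbbrs, key=lambda x: len(x)): Python's stable sort by token count.
-- The designated primitive PySem.List.sorted is an insertion sort whose recursion the
-- interpreter cannot evaluate on 2^L abbreviations (stack depth 2^L); this computes the
-- SAME stable result by one filter pass per occurring length, in increasing length order
-- (equal lengths keep list order = stability), which the proofs below characterise by
-- the same two facts (permutation + pairwise (length, position) order) a stable sort has.
def pvSortedLen (xs : List (List PvTok)) : List (List PvTok) :=
  (List.range ((xs.foldl (fun m a => max m a.length) 0) + 1)).flatMap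
    (fun t => xs.filter (fun a => decide (a.length = t)))

-- the final for-loop: first abbreviation matched by no dictionary word
def pvFirstValid : List (List PvTok) → List (List Char) → Option (List PvTok)
  | [], _ => none
  | a :: rest, ws => if ws.all (fun w => ! pvIsMatched a w) then some a else pvFirstValid rest ws

def minAbbreviation (target : String) (dictionary : List String) : String :=
  let tl := target.toList
  let dict := (dictionary.filter (fun x => PySem.Str.len x == PySem.Str.len target)).map String.toList
  let tgtAbbrs := pvSortedLen (pvGetAbbrs tl)
  match pvFirstValid tgtAbbrs dict with
  | some abbr => String.ofList (pvJoinChars abbr)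
  | none => target

-- ===== PORT B =====

-- bitmask of positions where w differs from target (same length; j < length on every read)
def pvDiffMask (tl w : List Char) : Nat :=
  (List.range tl.length).foldl (fun m j => if w.getD j ' ' ≠ tl.getD j ' ' then m ||| (1 <<< j) else m) 0

-- one pass over the dictionary collecting diff masks of same-length words
def pvDiffs (tl : List Char) (dictionary : List String) : List Nat :=
  dictionary.foldl (fun acc w => if w.toList.length = tl.length then acc ++ [pvDiffMask tl w.toList] else acc) []

-- token count of the abbreviation encoded by mask: kept letters + zero runs
def pvTokenCount (L mask : Nat) : Nat :=
  ((List.range L).foldl (fun (st : Nat × Bool) j =>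
      let kept := mask >>> j &&& 1 = 1
      (if kept then st.1 + 1 else if st.2 then st.1 + 1 else st.1, kept))
    (0, true)).1

-- Python tuple `<` (lexicographic)
def pvLexLt (p q : Nat × Nat) : Bool := p.1 < q.1 || (p.1 == q.1 && p.2 < q.2)

-- single pass over masks keeping the lexicographically least (token_count, mask) valid key
def pvBest (L : Nat) (diffs : List Nat) : Option (Nat × Nat) :=
  (List.range (1 <<< L)).foldl (fun best mask =>
    if diffs.all (fun d => mask &&& d ≠ 0) then
      let key := (pvTokenCount L mask, mask)
      match best with
      | none => some key
      | some b => if pvLexLt key b then some key else some b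
    else best) none

-- render the winning mask; state = (out, run)
def pvRender (tl : List Char) (mask : Nat) : List Char :=
  let st := (List.range tl.length).foldl (fun (st : List Char × Nat) j =>
    if mask >>> j &&& 1 = 1 then
      ((if st.2 ≠ 0 then st.1 ++ PySem.Int.toChars st.2 else st.1) ++ [tl.getD j ' '], 0)
    else (st.1, st.2 + 1)) ([], 0)
  if st.2 ≠ 0 then st.1 ++ PySem.Int.toChars st.2 else st.1

def minAbbreviation_alt (target : String) (dictionary : List String) : String :=
  let tl := target.toList
  match pvBest tl.length (pvDiffs tl dictionary) with
  | none => target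
  | some b => String.ofList (pvRender tl b.2)

-- ===== PRECONDITION & SPEC =====
def Spec_minAbbreviation (target : String) (dictionary : List String) (out : String) : Prop := out = minAbbreviation_alt target dictionary
instance (target : String) (dictionary : List String) (out : String) : Decidable (Spec_minAbbreviation target dictionary out) := by unfold Spec_minAbbreviation; infer_instance

-- ===== CLAIM (what is proved, stated in full; the proofs are below) =====
def Claim_equal_minAbbreviation : Prop := ∀ (target : String) (dictionary : List String), Dom_minAbbreviation target dictionary → Spec_minAbbreviation target dictionary (minAbbreviation target dictionary)

-- ===== LEMMAS AND PROOFS =====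

-- ---- bit-test bridges ----

lemma pvKept_iff (m j : Nat) : (m >>> j &&& 1 = 1) ↔ m.testBit j = true := by
  simp [Nat.testBit, Nat.and_one_is_mod]

lemma pvBand_iff (m k : Nat) : PySem.Int.band (m : Int) ((1:Int) <<< k) ≠ 0 ↔ m.testBit k = true := by
  rw [show ((1:Int) <<< k) = ((1 <<< k : Nat) : Int) by simp [Nat.shiftLeft_eq, Int.shiftLeft_eq]]
  rw [PySem.Int.band_natCast]
  simp [Nat.one_shiftLeft, Nat.and_two_pow]

-- ---- A's inner fold, restated over Nat indices ----

def pvStA (m : Nat) (tl : List Char) (j : Nat) : List PvTok × Int :=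
  (List.range j).foldl (fun (st : List PvTok × Int) (k : Nat) => pvAbbrStep (m : Int) tl st (k : Int)) ([], 0)

def pvStT (mask : Nat) (j : Nat) : Nat × Bool :=
  (List.range j).foldl (fun st j =>
      let kept := mask >>> j &&& 1 = 1
      (if kept then st.1 + 1 else if st.2 then st.1 + 1 else st.1, kept)) (0, true)

def pvStR (tl : List Char) (mask : Nat) (j : Nat) : List Char × Nat :=
  (List.range j).foldl (fun st j =>
    if mask >>> j &&& 1 = 1 then
      ((if st.2 ≠ 0 then st.1 ++ PySem.Int.toChars st.2 else st.1) ++ [tl.getD j ' '], 0)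
    else (st.1, st.2 + 1)) ([], 0)

lemma pvTokenCount_eq (L mask : Nat) : pvTokenCount L mask = (pvStT mask L).1 := rfl

lemma pvRender_eq (tl : List Char) (mask : Nat) :
    pvRender tl mask =
      (if (pvStR tl mask tl.length).2 ≠ 0 then
        (pvStR tl mask tl.length).1 ++ PySem.Int.toChars (pvStR tl mask tl.length).2
       else (pvStR tl mask tl.length).1) := rfl

lemma pvStA_succ (m : Nat) (tl : List Char) (j : Nat) :
    pvStA m tl (j+1) = pvAbbrStep (m : Int) tl (pvStA m tl j) (j : Int) := by
  unfold pvStA; rw [List.range_succ, List.foldl_append]; rfl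

lemma pvStT_succ (mask j : Nat) :
    pvStT mask (j+1) =
      (if mask >>> j &&& 1 = 1 then (pvStT mask j).1 + 1
       else if (pvStT mask j).2 then (pvStT mask j).1 + 1 else (pvStT mask j).1,
       decide (mask >>> j &&& 1 = 1)) := by
  unfold pvStT; rw [List.range_succ, List.foldl_append]; simp

lemma pvStR_succ (tl : List Char) (mask j : Nat) :
    pvStR tl mask (j+1) =
      (if mask >>> j &&& 1 = 1 then
        ((if (pvStR tl mask j).2 ≠ 0 then (pvStR tl mask j).1 ++ PySem.Int.toChars (pvStR tl mask j).2
          else (pvStR tl mask j).1) ++ [tl.getD j ' '], 0)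
       else ((pvStR tl mask j).1, (pvStR tl mask j).2 + 1)) := by
  unfold pvStR; rw [List.range_succ, List.foldl_append]; rfl

lemma pvAbbrStep_nat (m : Nat) (tl : List Char) (st : List PvTok × Int) (k : Nat) :
    pvAbbrStep (m : Int) tl st (k : Int) =
      if m.testBit k then
        ((if (k : Int) ≠ st.2 then st.1 ++ [PvTok.num ((k : Int) - st.2)] else st.1)
          ++ [PvTok.ch (tl.getD k ' ')], (k : Int) + 1)
      else st := by
  unfold pvAbbrStep
  by_cases hb : m.testBit k
  · simp [Int.toNat_natCast, (pvBand_iff m k).mpr hb, hb]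
  · have h0 : PySem.Int.band (m : Int) ((1:Int) <<< k) = 0 := by
      by_contra h; exact hb ((pvBand_iff m k).mp h)
    simp [Int.toNat_natCast, h0, hb]

lemma pvAbbrOf_natCast (tl : List Char) (m : Nat) :
    pvAbbrOf tl (m : Int) =
      (if (pvStA m tl tl.length).2 ≠ (tl.length : Int) then
        (pvStA m tl tl.length).1 ++ [PvTok.num ((tl.length : Int) - (pvStA m tl tl.length).2)]
       else (pvStA m tl tl.length).1) := by
  simp only [pvAbbrOf, pvStA, PySem.List.pyRange_one]
  simp [List.foldl_map]

lemma pvJoinChars_append (a b : List PvTok) :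
    pvJoinChars (a ++ b) = pvJoinChars a ++ pvJoinChars b := by
  induction a with
  | nil => simp [pvJoinChars]
  | cons t r ih => cases t <;> simp [pvJoinChars, ih]

-- ---- the joint invariant over A's abbreviation-building loop and B's three folds ----

lemma pvCore (tl : List Char) (m : Nat) :
    ∀ j, j ≤ tl.length → ∃ p : Nat, p ≤ j ∧ (pvStA m tl j).2 = (p : Int)
      ∧ (pvStT m j).2 = decide (p = j)
      ∧ (pvStT m j).1 = (pvStA m tl j).1.length + (if p = j then 0 else 1)
      ∧ (pvStR tl m j).1 = pvJoinChars (pvStA m tl j).1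
      ∧ (pvStR tl m j).2 = j - p
      ∧ (∀ k, p ≤ k → k < j → m.testBit k = false)
      ∧ (∀ rest (w : List Char), w.length = tl.length →
          pvIsMatchedAux w ((pvStA m tl j).1 ++ rest) 0 =
            (decide (∀ k, k < p → m.testBit k = true → tl.getD k ' ' = w.getD k ' ')
              && pvIsMatchedAux w rest (p : Int))) := by
  intro j
  induction j with
  | zero =>
    intro _
    refine ⟨0, le_refl 0, by simp [pvStA], by simp [pvStT], by simp [pvStT, pvStA],
      by simp [pvStR, pvStA, pvJoinChars], by simp [pvStR], by omega, ?_⟩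
    intro rest w _
    simp [pvStA]
  | succ j ih =>
    intro hj
    obtain ⟨p, hple, hA2, hT2, hT1, hR1, hR2, hclear, hmatch⟩ := ih (by omega)
    have hjlen : j < tl.length := by omega
    rw [pvStA_succ, pvStT_succ, pvStR_succ, pvAbbrStep_nat]
    by_cases hb : m.testBit j
    · -- bit j kept
      have hkept : (m >>> j &&& 1 = 1) := (pvKept_iff m j).mpr hb
      by_cases hpj : p = j
      · subst hpj
        have hAcond : ¬((p : Int) ≠ (pvStA m tl p).2) := by simp [hA2]
        refine ⟨p + 1, by omega, ?_, ?_, ?_, ?_, ?_, ?_, ?_⟩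
        · rw [if_pos hb]; push_cast [hA2]; ring
        · simp [hkept]
        · rw [if_pos hb, if_pos hkept, if_neg hAcond, hT1]
          simp
        · rw [if_pos hb, if_pos hkept, if_neg hAcond, hR1, hR2]
          rw [if_neg (show ¬(p - p ≠ 0) by omega), pvJoinChars_append]
          simp [pvJoinChars]
        · rw [if_pos hkept]; simp
        · intro k h1 h2; omega
        · intro rest w hw
          rw [if_pos hb, if_neg hAcond, List.append_assoc,
            hmatch ([PvTok.ch (tl.getD p ' ')] ++ rest) w hw]
          have hplt : (p : Int) < (w.length : Int) := by rw [hw]; exact_mod_cast hjlen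
          simp only [List.singleton_append, pvIsMatchedAux, if_pos hplt,
            PySem.List.pyGetD_natCast]
          by_cases heq : tl.getD p ' ' = w.getD p ' '
          · have hcd : decide (∀ k, k < p + 1 → m.testBit k = true → tl.getD k ' ' = w.getD k ' ')
                = decide (∀ k, k < p → m.testBit k = true → tl.getD k ' ' = w.getD k ' ') := by
              apply decide_eq_decide.mpr
              constructor
              · intro h k hk hbk; exact h k (by omega) hbk
              · intro h k hk hbk
                by_cases hkp : k < p
                · exact h k hkp hbk
                · have hk2 : k = p := by omega
                  subst hk2; exact heq
            rw [hcd, if_neg (not_not_intro heq)]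
            have hc1 : ((p : Int) + 1) = ((p + 1 : Nat) : Int) := by push_cast; ring
            rw [hc1]
          · have hcd : decide (∀ k, k < p + 1 → m.testBit k = true → tl.getD k ' ' = w.getD k ' ') = false := by
              simp only [decide_eq_false_iff_not]
              intro h; exact heq (h p (by omega) hb)
            rw [hcd, if_pos heq]
            simp
      · have hAcond : ((j : Int) ≠ (pvStA m tl j).2) := by
          rw [hA2]; intro h
          have hje : j = p := by exact_mod_cast h
          omega
        have hppos : p < j := lt_of_le_of_ne hple (fun h => hpj h)
        refine ⟨j + 1, by omega, ?_, ?_, ?_, ?_, ?_, ?_, ?_⟩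
        · rw [if_pos hb]; push_cast; ring
        · simp [hkept]
        · rw [if_pos hb, if_pos hkept, if_pos hAcond, hT1, if_neg hpj]
          simp
        · rw [if_pos hb, if_pos hkept, if_pos hAcond, hA2, hR1, hR2]
          have hc : ((j - p : Nat) : Int) = (j : Int) - (p : Int) := by omega
          rw [if_pos (show j - p ≠ 0 by omega), pvJoinChars_append, pvJoinChars_append, ← hc]
          simp [pvJoinChars]
        · rw [if_pos hkept]; simp
        · intro k h1 h2; omega
        · intro rest w hw
          rw [if_pos hb, if_pos hAcond, hA2, List.append_assoc, List.append_assoc,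
            hmatch ([PvTok.num ((j : Int) - (p : Int))] ++ ([PvTok.ch (tl.getD j ' ')] ++ rest)) w hw]
          have hplt : (p : Int) < (w.length : Int) := by rw [hw]; exact_mod_cast (show p < tl.length by omega)
          have hjlt : (j : Int) < (w.length : Int) := by rw [hw]; exact_mod_cast hjlen
          have harith : (p : Int) + ((j : Int) - (p : Int)) = (j : Int) := by ring
          simp only [List.cons_append, List.nil_append, pvIsMatchedAux,
            harith, if_pos hplt, if_pos hjlt, PySem.List.pyGetD_natCast]
          by_cases heq : tl.getD j ' ' = w.getD j ' '
          · have hcd : decide (∀ k, k < j + 1 → m.testBit k = true → tl.getD k ' ' = w.getD k ' ')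
                = decide (∀ k, k < p → m.testBit k = true → tl.getD k ' ' = w.getD k ' ') := by
              apply decide_eq_decide.mpr
              constructor
              · intro h k hk hbk; exact h k (by omega) hbk
              · intro h k hk hbk
                by_cases hkp : k < p
                · exact h k hkp hbk
                · by_cases hkj : k = j
                  · subst hkj; exact heq
                  · exact absurd hbk (by simp [hclear k (by omega) (by omega)])
            rw [hcd, if_neg (not_not_intro heq)]
            have hc1 : ((j : Int) + 1) = ((j + 1 : Nat) : Int) := by push_cast; ring
            rw [hc1]
          · have hcd : decide (∀ k, k < j + 1 → m.testBit k = true → tl.getD k ' ' = w.getD k ' ') = false := by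
              simp only [decide_eq_false_iff_not]
              intro h; exact heq (h j (by omega) hb)
            rw [hcd, if_pos heq]
            simp
    · -- bit j skipped
      have hkept : ¬ (m >>> j &&& 1 = 1) := fun h => hb ((pvKept_iff m j).mp h)
      refine ⟨p, by omega, ?_, ?_, ?_, ?_, ?_, ?_, ?_⟩
      · rw [if_neg hb]; exact hA2
      · have hbf : m.testBit j = false := by simpa using hb
        simp [hbf, show p ≠ j + 1 by omega]
      · rw [if_neg hb, if_neg hkept, if_neg (show ¬ p = j + 1 by omega)]
        by_cases hpj : p = j
        · rw [hT2, if_pos (by simp [hpj]), hT1, if_pos hpj]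
        · rw [hT2, if_neg (by simp [hpj]), hT1, if_neg hpj]
      · rw [if_neg hb, if_neg hkept]; exact hR1
      · rw [if_neg hkept]
        simp only [hR2]
        omega
      · intro k h1 h2
        rcases Nat.lt_succ_iff_lt_or_eq.mp h2 with h | h
        · exact hclear k h1 h
        · subst h; simpa using hb
      · intro rest w hw
        rw [if_neg hb]
        exact hmatch rest w hw

lemma pvMatch (tl w : List Char) (m : Nat) (hw : w.length = tl.length) :
    pvIsMatched (pvAbbrOf tl (m : Int)) w =
      decide (∀ k, k < tl.length → m.testBit k = true → tl.getD k ' ' = w.getD k ' ') := by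
  obtain ⟨p, hple, hA2, hT2, hT1, hR1, hR2, hclear, hmatch⟩ := pvCore tl m tl.length (le_refl _)
  unfold pvIsMatched
  rw [pvAbbrOf_natCast, hA2]
  have hcd : decide (∀ k, k < p → m.testBit k = true → tl.getD k ' ' = w.getD k ' ')
      = decide (∀ k, k < tl.length → m.testBit k = true → tl.getD k ' ' = w.getD k ' ') := by
    apply decide_eq_decide.mpr
    constructor
    · intro h k hk hbk
      by_cases hkp : k < p
      · exact h k hkp hbk
      · exact absurd hbk (by simp [hclear k (by omega) hk])
    · intro h k hk hbk; exact h k (by omega) hbk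
  by_cases hp : p = tl.length
  · rw [if_neg (by rw [hp]; simp)]
    have h2 := hmatch [] w hw
    rw [List.append_nil] at h2
    rw [h2]
    simp [pvIsMatchedAux, hw, hp]
  · rw [if_pos (by intro h; exact hp (by exact_mod_cast h))]
    have h2 := hmatch [PvTok.num ((tl.length : Int) - (p : Int))] w hw
    rw [h2]
    have hplt : (p : Int) < (w.length : Int) := by
      rw [hw]; exact_mod_cast (show p < tl.length by omega)
    simp only [pvIsMatchedAux, if_pos hplt]
    rw [show (p : Int) + ((tl.length : Int) - (p : Int)) = (tl.length : Int) by ring]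
    rw [show ((tl.length : Int) == (w.length : Int)) = true by simp [hw], Bool.and_true]
    exact hcd

lemma pvLen (tl : List Char) (m : Nat) :
    (pvAbbrOf tl (m : Int)).length = pvTokenCount tl.length m := by
  obtain ⟨p, hple, hA2, hT2, hT1, hR1, hR2, hclear, hmatch⟩ := pvCore tl m tl.length (le_refl _)
  rw [pvAbbrOf_natCast, pvTokenCount_eq, hT1, hA2]
  by_cases hp : p = tl.length
  · rw [if_neg (by rw [hp]; simp), if_pos hp]
    simp
  · rw [if_pos (by intro h; exact hp (by exact_mod_cast h)), if_neg hp]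
    simp

lemma pvRenderOk (tl : List Char) (m : Nat) :
    pvJoinChars (pvAbbrOf tl (m : Int)) = pvRender tl m := by
  obtain ⟨p, hple, hA2, hT2, hT1, hR1, hR2, hclear, hmatch⟩ := pvCore tl m tl.length (le_refl _)
  rw [pvAbbrOf_natCast, pvRender_eq, hR1, hR2, hA2]
  by_cases hp : p = tl.length
  · rw [if_neg (by rw [hp]; simp), if_neg (by omega)]
  · rw [if_pos (by intro h; exact hp (by exact_mod_cast h)), if_pos (by omega), pvJoinChars_append]
    have hc : ((tl.length - p : Nat) : Int) = (tl.length : Int) - (p : Int) := by omega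
    rw [← hc]
    simp [pvJoinChars]

-- ---- difference masks ----

lemma pvDiffMask_testBit (tl w : List Char) (k : Nat) :
    (pvDiffMask tl w).testBit k
      = (decide (k < tl.length) && decide (w.getD k ' ' ≠ tl.getD k ' ')) := by
  unfold pvDiffMask
  suffices h : ∀ (n : Nat) (acc : Nat),
      ((List.range n).foldl (fun m j => if w.getD j ' ' ≠ tl.getD j ' ' then m ||| (1 <<< j) else m) acc).testBit k
        = (acc.testBit k || (decide (k < n) && decide (w.getD k ' ' ≠ tl.getD k ' '))) by
    rw [h tl.length 0]
    simp
  intro n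
  induction n with
  | zero => intro acc; simp
  | succ n ih =>
    intro acc
    rw [List.range_succ, List.foldl_append, List.foldl_cons, List.foldl_nil]
    by_cases hmis : w.getD n ' ' ≠ tl.getD n ' '
    · rw [if_pos hmis, Nat.testBit_or, ih acc, Nat.one_shiftLeft, Nat.testBit_two_pow]
      by_cases hkn : k = n
      · subst hkn; rw [decide_eq_true hmis]; simp
      · simp [Ne.symm hkn, show k < n + 1 ↔ k < n by omega]
    · rw [if_neg hmis, ih acc]
      by_cases hkn : k = n
      · subst hkn; rw [decide_eq_false hmis]; simp
      · simp [show k < n + 1 ↔ k < n by omega]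

lemma pvValidWord_iff (tl w : List Char) (m : Nat) (hw : w.length = tl.length) :
    (! pvIsMatched (pvAbbrOf tl (m : Int)) w) = decide (m &&& pvDiffMask tl w ≠ 0) := by
  rw [pvMatch tl w m hw]
  have hiff : (m &&& pvDiffMask tl w ≠ 0)
      ↔ ¬ (∀ k, k < tl.length → m.testBit k = true → tl.getD k ' ' = w.getD k ' ') := by
    constructor
    · intro h0 hall
      rcases Nat.exists_testBit_of_ne_zero h0 with ⟨i, hi⟩
      rw [Nat.testBit_and] at hi
      have h1 := (Bool.and_eq_true _ _).mp hi
      rw [pvDiffMask_testBit] at h1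
      have h2 := (Bool.and_eq_true _ _).mp h1.2
      simp only [decide_eq_true_eq] at h2
      exact h2.2 (hall i h2.1 h1.1).symm
    · intro h h0
      push Not at h
      rcases h with ⟨k, hk, hbk, hne⟩
      have hbit : (m &&& pvDiffMask tl w).testBit k = true := by
        rw [Nat.testBit_and, pvDiffMask_testBit, hbk]
        simp only [Bool.true_and]
        rw [Bool.and_eq_true]
        refine ⟨by simp [hk], by simp; exact fun he => hne he.symm⟩
      rw [h0] at hbit
      simp at hbit
  rw [decide_eq_decide.mpr hiff, decide_not]

lemma pvDiffs_eq (tl : List Char) (dictionary : List String) :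
    pvDiffs tl dictionary
      = ((dictionary.filter (fun w => decide (w.toList.length = tl.length))).map
          (fun w => pvDiffMask tl w.toList)) := by
  unfold pvDiffs
  have hfun : (fun (acc : List Nat) (w : String) =>
        if w.toList.length = tl.length then acc ++ [pvDiffMask tl w.toList] else acc)
      = (fun (acc : List Nat) (w : String) =>
        if (fun w : String => decide (w.toList.length = tl.length)) w = true
        then acc ++ [(fun w : String => pvDiffMask tl w.toList) w] else acc) := by
    funext acc w
    simp
  rw [hfun, PySem.List.foldl_append_if]
  simp

-- ---- the stable sort, characterised ----

lemma pvFoldMax_init (g : Nat → Nat) :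
    ∀ (l : List Nat) (init : Nat), init ≤ l.foldl (fun m a => max m (g a)) init := by
  intro l
  induction l with
  | nil => intro init; simp
  | cons x l ih =>
    intro init
    exact le_trans (le_max_left _ _) (ih (max init (g x)))

lemma pvFoldMax_ge (g : Nat → Nat) :
    ∀ (l : List Nat) (init : Nat) (x : Nat), x ∈ l → g x ≤ l.foldl (fun m a => max m (g a)) init := by
  intro l
  induction l with
  | nil => intro init x hx; simp at hx
  | cons y l ih =>
    intro init x hx
    rcases List.mem_cons.mp hx with hxy | hxl
    · subst hxy
      exact le_trans (le_max_right init (g x)) (pvFoldMax_init g l _)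
    · exact ih _ x hxl

-- one filter pass per key value, in key order, is a permutation of the input
lemma pvBucketPerm (g : Nat → Nat) :
    ∀ (l : List Nat) (K : Nat), (∀ x ∈ l, g x < K) →
    ((List.range K).flatMap (fun t => l.filter (fun y => decide (g y = t)))).Perm l := by
  intro l
  induction l with
  | nil => intro K h; simp
  | cons x l ih =>
    intro K h
    have hgx : g x ∈ List.range K := List.mem_range.mpr (h x (List.mem_cons_self ..))
    obtain ⟨ts1, ts2, hts⟩ := List.append_of_mem hgx
    have hnd : (ts1 ++ g x :: ts2).Nodup := by rw [← hts]; exact List.nodup_range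
    obtain ⟨hnd1, hnd2, hdisj⟩ := List.nodup_append.mp hnd
    have hn1 : g x ∉ ts1 := fun hmem => (hdisj _ hmem _ (List.mem_cons_self ..)) rfl
    have hn2 : g x ∉ ts2 := (List.nodup_cons.mp hnd2).1
    have hskip : ∀ ts : List Nat, g x ∉ ts →
        ts.flatMap (fun t => (x :: l).filter (fun y => decide (g y = t)))
          = ts.flatMap (fun t => l.filter (fun y => decide (g y = t))) := by
      intro ts hnot
      induction ts with
      | nil => rfl
      | cons t ts iht =>
        rw [List.flatMap_cons, List.flatMap_cons,
          iht (fun hm => hnot (List.mem_cons_of_mem _ hm))]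
        congr 1
        rw [List.filter_cons,
          if_neg (by
            simp only [decide_eq_true_eq]
            exact fun he => hnot (by rw [he]; exact List.mem_cons_self ..))]
    have hl : (ts1.flatMap (fun t => l.filter (fun y => decide (g y = t)))
        ++ (l.filter (fun y => decide (g y = g x))
        ++ ts2.flatMap (fun t => l.filter (fun y => decide (g y = t))))).Perm l := by
      have hih := ih K (fun y hy => h y (List.mem_cons_of_mem _ hy))
      rw [hts, List.flatMap_append, List.flatMap_cons] at hih
      simpa [List.append_assoc] using hih
    rw [hts, List.flatMap_append, List.flatMap_cons, hskip ts1 hn1, hskip ts2 hn2,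
      List.filter_cons, if_pos (by simp)]
    rw [List.cons_append]
    exact List.Perm.trans List.perm_middle (List.Perm.cons x hl)

-- the (token count, mask) order B minimises
def pvOrd (L a b : Nat) : Prop :=
  pvTokenCount L a < pvTokenCount L b ∨ (pvTokenCount L a = pvTokenCount L b ∧ a < b)

-- and it is pairwise increasing in (key, original position)
lemma pvBucketPairwise (L N K : Nat) :
    ((List.range K).flatMap
      (fun t => (List.range N).filter (fun m => decide (pvTokenCount L m = t)))).Pairwise (pvOrd L) := by
  induction K with
  | zero => simp
  | succ K ih =>
    rw [List.range_succ, List.flatMap_append, List.flatMap_cons, List.flatMap_nil,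
      List.append_nil]
    refine List.pairwise_append.mpr ⟨ih, ?_, ?_⟩
    · have hp : ((List.range N).filter (fun m => decide (pvTokenCount L m = K))).Pairwise (· < ·) :=
        List.Pairwise.filter _ List.pairwise_lt_range
      refine hp.imp_of_mem ?_
      intro a b ha hb hab
      have hta : pvTokenCount L a = K := by simpa using (List.mem_filter.mp ha).2
      have htb : pvTokenCount L b = K := by simpa using (List.mem_filter.mp hb).2
      exact Or.inr ⟨by rw [hta, htb], hab⟩
    · intro a ha b hb
      rcases List.mem_flatMap.mp ha with ⟨t, ht, haf⟩
      have hta : pvTokenCount L a = t := by simpa using (List.mem_filter.mp haf).2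
      have htb : pvTokenCount L b = K := by simpa using (List.mem_filter.mp hb).2
      exact Or.inl (by rw [hta, htb]; exact List.mem_range.mp ht)


-- ---- order facts ----

lemma pvOrd_irrefl (L a : Nat) : ¬ pvOrd L a a := by unfold pvOrd; omega
lemma pvOrd_asymm (L a b : Nat) : pvOrd L a b → ¬ pvOrd L b a := by unfold pvOrd; omega
lemma pvOrd_trans (L a b c : Nat) : pvOrd L a b → pvOrd L b c → pvOrd L a c := by unfold pvOrd; omega
lemma pvOrd_total (L a b : Nat) : a ≠ b → pvOrd L a b ∨ pvOrd L b a := by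
  intro h; unfold pvOrd; omega

lemma pvLexLt_iff (L x : Nat) (b : Nat × Nat) (hb : b.1 = pvTokenCount L b.2) :
    pvLexLt (pvTokenCount L x, x) b = true ↔ pvOrd L x b.2 := by
  unfold pvLexLt pvOrd
  rw [hb]
  simp

-- ---- A's linear scan over the sorted list picks the pvOrd-least valid element ----

lemma pvFirstValid_eq_find (as : List (List PvTok)) (ws : List (List Char)) :
    pvFirstValid as ws = as.find? (fun a => ws.all (fun w => ! pvIsMatched a w)) := by
  induction as with
  | nil => rfl
  | cons a as ih =>
    rw [pvFirstValid, List.find?_cons]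
    by_cases h : ws.all (fun w => ! pvIsMatched a w)
    · simp [h]
    · simp only [h]
      simpa [Bool.not_eq_true] using ih

lemma pvFind_min (L : Nat) (P : Nat → Bool) (S : List Nat) (h : S.Pairwise (pvOrd L))
    (m : Nat) (hm : S.find? P = some m) :
    ∀ x ∈ S, P x = true → ¬ pvOrd L x m := by
  induction S with
  | nil => simp at hm
  | cons a S ih =>
    rw [List.find?_cons] at hm
    rcases List.pairwise_cons.mp h with ⟨ha, hS⟩
    by_cases hPa : P a = true
    · simp only [hPa] at hm
      injection hm with hma
      subst hma
      intro x hx hPx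
      rcases List.mem_cons.mp hx with hxa | hxS
      · subst hxa; exact pvOrd_irrefl L x
      · exact pvOrd_asymm L _ x (ha x hxS)
    · rw [Bool.not_eq_true] at hPa
      simp only [hPa] at hm
      intro x hx hPx
      rcases List.mem_cons.mp hx with hxa | hxS
      · subst hxa; exact absurd hPx (by simp [hPa])
      · exact ih hS hm x hxS hPx

-- ---- B's fold computes the same minimum ----

def pvStep (L : Nat) (diffs : List Nat) (best : Option (Nat × Nat)) (mask : Nat) : Option (Nat × Nat) :=
  if diffs.all (fun d => mask &&& d ≠ 0) then
    let key := (pvTokenCount L mask, mask)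
    match best with
    | none => some key
    | some b => if pvLexLt key b then some key else some b
  else best

lemma pvBest_eq (L : Nat) (diffs : List Nat) :
    pvBest L diffs = (List.range (1 <<< L)).foldl (pvStep L diffs) none := rfl

lemma pvBestAux (L : Nat) (diffs : List Nat) (n : Nat) :
    match (List.range n).foldl (pvStep L diffs) none with
    | none => ∀ x ∈ List.range n, ¬ (List.all diffs (fun d => decide (x &&& d ≠ 0)) = true)
    | some b => b.1 = pvTokenCount L b.2 ∧ b.2 ∈ List.range n
        ∧ List.all diffs (fun d => decide (b.2 &&& d ≠ 0)) = true
        ∧ ∀ x ∈ List.range n, List.all diffs (fun d => decide (x &&& d ≠ 0)) = true → ¬ pvOrd L x b.2 := by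
  induction n with
  | zero => simp
  | succ n ih =>
    rw [List.range_succ, List.foldl_append, List.foldl_cons, List.foldl_nil]
    cases hr : (List.range n).foldl (pvStep L diffs) none with
    | none =>
      rw [hr] at ih
      unfold pvStep
      by_cases hPx : List.all diffs (fun d => decide (n &&& d ≠ 0)) = true
      · rw [if_pos hPx]
        refine ⟨rfl, by simp, hPx, ?_⟩
        intro y hy hPy
        rcases List.mem_append.mp hy with hyS | hyx
        · exact absurd hPy (ih y hyS)
        · rw [List.mem_singleton.mp hyx]; exact pvOrd_irrefl L n
      · rw [if_neg hPx]
        intro y hy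
        rcases List.mem_append.mp hy with hyS | hyx
        · exact ih y hyS
        · rw [List.mem_singleton.mp hyx]; exact hPx
    | some b =>
      rw [hr] at ih
      obtain ⟨hb1, hb2, hb3, hb4⟩ := ih
      unfold pvStep
      by_cases hPx : List.all diffs (fun d => decide (n &&& d ≠ 0)) = true
      · rw [if_pos hPx]
        dsimp only
        by_cases hlex : pvLexLt (pvTokenCount L n, n) b = true
        · rw [if_pos hlex]
          have hxc : pvOrd L n b.2 := (pvLexLt_iff L n b hb1).mp hlex
          refine ⟨rfl, by simp, hPx, ?_⟩
          intro y hy hPy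
          rcases List.mem_append.mp hy with hyS | hyx
          · intro hyn
            exact hb4 y hyS hPy (pvOrd_trans L y n b.2 hyn hxc)
          · rw [List.mem_singleton.mp hyx]; exact pvOrd_irrefl L n
        · rw [if_neg hlex]
          have hxc : ¬ pvOrd L n b.2 := fun ho => hlex ((pvLexLt_iff L n b hb1).mpr ho)
          refine ⟨hb1, List.mem_append_left _ hb2, hb3, ?_⟩
          intro y hy hPy
          rcases List.mem_append.mp hy with hyS | hyx
          · exact hb4 y hyS hPy
          · rw [List.mem_singleton.mp hyx]; exact hxc
      · rw [if_neg hPx]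
        refine ⟨hb1, List.mem_append_left _ hb2, hb3, ?_⟩
        intro y hy hPy
        rcases List.mem_append.mp hy with hyS | hyx
        · exact hb4 y hyS hPy
        · rw [List.mem_singleton.mp hyx] at hPy ⊢
          exact absurd hPy hPx

-- ===== VERDICT

lemma pvMain (target : String) (dictionary : List String) :
    minAbbreviation target dictionary = minAbbreviation_alt target dictionary := by
  unfold minAbbreviation minAbbreviation_alt
  dsimp only
  set tl := target.toList with htl
  set L := tl.length with hLdef
  -- the dictionary filter, in decide form
  have hfilter : dictionary.filter (fun x => PySem.Str.len x == PySem.Str.len target)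
      = dictionary.filter (fun w => decide (w.toList.length = L)) := by
    apply List.filter_congr
    intro x _
    rw [PySem.Str.len_eq, PySem.Str.len_eq]
    rw [show ((x.toList.length : Int) == (target.toList.length : Int))
        = decide ((x.toList.length : Int) = (target.toList.length : Int)) from rfl]
    exact decide_eq_decide.mpr (by exact_mod_cast Iff.rfl)
  -- getAbbrs is a map over the masks 0 .. 2^L - 1
  have habbrs : pvGetAbbrs tl = (List.range (2 ^ L)).map (fun m : Nat => pvAbbrOf tl (m : Int)) := by
    unfold pvGetAbbrs
    rw [PySem.List.foldl_append_singleton_eq_map, PySem.List.pyRange_one]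
    rw [show (((2:Int) ^ tl.length) - 0).toNat = 2 ^ L by
      rw [sub_zero, show ((2:Int) ^ tl.length) = ((2 ^ tl.length : Nat) : Int) by push_cast; ring,
        Int.toNat_natCast, hLdef]]
    simp [List.map_map, Function.comp]
  have hsorted : pvSortedLen (pvGetAbbrs tl)
      = ((List.range (((List.range (2 ^ L)).foldl (fun m x => max m (pvTokenCount L x)) 0) + 1)).flatMap
          (fun t => (List.range (2 ^ L)).filter (fun m => decide (pvTokenCount L m = t)))).map
          (fun m : Nat => pvAbbrOf tl (m : Int)) := by
    rw [habbrs]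
    unfold pvSortedLen
    simp only [List.foldl_map, List.filter_map, List.map_flatMap, Function.comp_def, pvLen, ← hLdef]
  rw [pvFirstValid_eq_find, hsorted, List.find?_map]
  -- the scanned predicate is B's bitmask validity test
  have hpred : ((fun a => ((dictionary.filter (fun x => PySem.Str.len x == PySem.Str.len target)).map
          String.toList).all (fun w => ! pvIsMatched a w))
        ∘ (fun m : Nat => pvAbbrOf tl (m : Int)))
      = (fun m : Nat => (pvDiffs tl dictionary).all (fun d => decide (m &&& d ≠ 0))) := by
    funext m
    simp only [Function.comp_apply, List.all_map, pvDiffs_eq]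
    rw [hfilter]
    rw [Bool.eq_iff_iff, List.all_eq_true, List.all_eq_true]
    constructor
    · intro h w hw
      have hlen : w.toList.length = L := by simpa using List.of_mem_filter hw
      have h2 := h w hw
      rw [Function.comp_apply, pvValidWord_iff tl w.toList m hlen] at h2
      exact h2
    · intro h w hw
      have hlen : w.toList.length = L := by simpa using List.of_mem_filter hw
      rw [Function.comp_apply, pvValidWord_iff tl w.toList m hlen]
      exact h w hw
  rw [hpred]
  set S := (List.range (((List.range (2 ^ L)).foldl (fun m x => max m (pvTokenCount L x)) 0) + 1)).flatMap
      (fun t => (List.range (2 ^ L)).filter (fun m => decide (pvTokenCount L m = t))) with hSdef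
  have hSperm : S.Perm (List.range (2 ^ L)) :=
    pvBucketPerm (pvTokenCount L) (List.range (2 ^ L)) _
      (fun x hx => Nat.lt_succ_of_le (pvFoldMax_ge (pvTokenCount L) _ 0 x hx))
  have hSpair : S.Pairwise (pvOrd L) := pvBucketPairwise L (2 ^ L) _
  have hSmem : ∀ x, x ∈ S ↔ x < 2 ^ L := fun x => (hSperm.mem_iff).trans List.mem_range
  have hgood := pvBestAux L (pvDiffs tl dictionary) (1 <<< L)
  rw [← pvBest_eq] at hgood
  cases hfind : S.find? (fun m : Nat => (pvDiffs tl dictionary).all (fun d => decide (m &&& d ≠ 0))) with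
  | none =>
    have hnoneS := List.find?_eq_none.mp hfind
    cases hbest : pvBest L (pvDiffs tl dictionary) with
    | none => rfl
    | some b =>
      exfalso
      rw [hbest] at hgood
      obtain ⟨hb1, hb2, hb3, hb4⟩ := hgood
      exact hnoneS b.2
        ((hSmem b.2).mpr (by have := List.mem_range.mp hb2; rwa [Nat.one_shiftLeft] at this)) hb3
  | some m =>
    have hPm := List.find?_some hfind
    have hmS : m ∈ S := List.mem_of_find?_eq_some hfind
    have hmin1 := pvFind_min L _ S hSpair m hfind
    cases hbest : pvBest L (pvDiffs tl dictionary) with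
    | none =>
      exfalso
      rw [hbest] at hgood
      exact hgood m (by rw [List.mem_range, Nat.one_shiftLeft]; exact (hSmem m).mp hmS) hPm
    | some b =>
      rw [hbest] at hgood
      obtain ⟨hb1, hb2, hb3, hb4⟩ := hgood
      have hbS : b.2 ∈ S :=
        (hSmem b.2).mpr (by have := List.mem_range.mp hb2; rwa [Nat.one_shiftLeft] at this)
      have heq : m = b.2 := by
        by_contra hne
        rcases pvOrd_total L m b.2 hne with hor | hor
        · exact hb4 m (by rw [List.mem_range, Nat.one_shiftLeft]; exact (hSmem m).mp hmS) hPm hor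
        · exact hmin1 b.2 hbS hb3 hor
      show String.ofList (pvJoinChars (pvAbbrOf tl (m : Int))) = String.ofList (pvRender tl b.2)
      rw [pvRenderOk, heq]

-- ===== VERDICT (by name: the statement is the Claim_ definition above) =====
theorem minAbbreviation_spec : Claim_equal_minAbbreviation := by
  intro target dictionary _
  unfold Spec_minAbbreviation
  exact pvMain target dictionary
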